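-- pv_equiv track=rewrite | github.com/hed-standard/hed-python | hedtools/hed/utilities/tag_compare.py | _split_hed_string
-- ===== SOURCE A (Python) =====
-- def _split_hed_string(hed_string):
--     """Takes a hed string and splits it into delimiters and tags
--
--         Note: This does not validate tags in any form.
--
--     Parameters
--     ----------
--         hed_string: string
--             the hed string to split
--     Returns
--     -------
--     list of tuples.
--         each tuple: (is_hed_tag, (start_pos, end_pos))
--         is_hed_tag: bool
--             This is a (possible) hed tag if true, delimiter if not
--         start_pos: int
--             index of start of string in hed_string
--         end_pos: int
--             index of end of string in hed_string
--     """
--     tag_delimiters = ",()~"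
--     current_spacing = 0
--     inside_d = True
--     result_positions = []
--     start_pos = None
--     last_end_pos = 0
--     for i, char in enumerate(hed_string):
--         if char == " ":
--             current_spacing += 1
--             continue
--
--         if char in tag_delimiters:
--             if not inside_d:
--                 inside_d = True
--                 if start_pos is not None:
--                     last_end_pos = i - current_spacing
--                     # view_string = hed_string[start_pos: last_end_pos]
--                     result_positions.append((True, (start_pos, last_end_pos)))
--                     current_spacing = 0
--                     start_pos = None
--             continue
--
--         # If we have a current delimiter, end it here.
--         if inside_d and last_end_pos is not None:
--             # view_string = hed_string[last_end_pos: i]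
--             if last_end_pos != i:
--                 result_positions.append((False, (last_end_pos, i)))
--             last_end_pos = None
--
--         current_spacing = 0
--         inside_d = False
--         if start_pos is None:
--             start_pos = i
--
--     if last_end_pos is not None and len(hed_string) != last_end_pos:
--         # view_string = hed_string[last_end_pos: len(hed_string)]
--         result_positions.append((False, (last_end_pos, len(hed_string))))
--     if start_pos is not None:
--         # view_string = hed_string[start_pos: len(hed_string)]
--         result_positions.append((True, (start_pos, len(hed_string) - current_spacing)))
--         if current_spacing:
--             result_positions.append((False, (len(hed_string) - current_spacing, len(hed_string))))
--
--     # debug_result_strings = [hed_string[startpos:endpos] for (is_hed_string, (startpos, endpos)) in result_positions]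
--     return result_positions
-- ===== SOURCE B (Python) =====
-- def _split_hed_string(hed_string):
--     """Two-phase split: first collect trimmed tag spans, then interleave delimiter gaps."""
--     delimiters = ",()~"
--     n = len(hed_string)
--     # Phase 1: tag spans.  A span starts at the first non-space tag character of a
--     # maximal run of non-delimiter characters and ends after its last non-space one.
--     spans = []
--     i = 0
--     while i < n:
--         ch = hed_string[i]
--         if ch in delimiters or ch == " ":
--             i += 1
--         else:
--             j = i + 1
--             e = i + 1
--             while j < n and hed_string[j] not in delimiters:
--                 if hed_string[j] != " ":
--                     e = j + 1
--                 j += 1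
--             spans.append((i, e))
--             i = j
--     # Phase 2: walk the spans with a cursor, emitting delimiter gaps between them.
--     result = []
--     cursor = 0
--     for s, e in spans:
--         if cursor < s:
--             result.append((False, (cursor, s)))
--         result.append((True, (s, e)))
--         cursor = e
--     if cursor < n:
--         result.append((False, (cursor, n)))
--     return result
-- ===== Notes on version B (the rewrite author's own statement) =====
-- stated objective: simpler
-- what changed: Replaced A's single-pass five-variable state machine (spacing counter, inside-delimiter flag, two Option position registers) with a two-phase decomposition: first collect the trimmed tag spans by scanning maximal non-delimiter runs, then interleave the delimiter gaps with a cursor.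
import Mathlib
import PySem

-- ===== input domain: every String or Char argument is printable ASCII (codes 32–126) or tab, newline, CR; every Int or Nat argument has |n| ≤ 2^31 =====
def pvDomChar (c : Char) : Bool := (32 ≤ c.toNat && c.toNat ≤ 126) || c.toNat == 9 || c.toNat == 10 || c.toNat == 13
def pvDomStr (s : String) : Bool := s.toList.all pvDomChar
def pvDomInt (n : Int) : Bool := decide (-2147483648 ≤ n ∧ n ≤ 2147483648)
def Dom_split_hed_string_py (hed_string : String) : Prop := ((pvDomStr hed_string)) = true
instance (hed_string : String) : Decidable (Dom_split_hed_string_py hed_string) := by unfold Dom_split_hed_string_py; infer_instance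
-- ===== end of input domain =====

-- B is a simpler two-phase re-implementation (collect trimmed tag spans, then interleave
-- delimiter gaps) of A's one-pass five-variable state machine; same return value, same cost.

-- ===== PORT A =====
-- state = (current_spacing, inside_d, result_positions, start_pos, last_end_pos)
def pvAStep (st : Int × Bool × List (Bool × (Int × Int)) × Option Int × Option Int)
    (p : Int × Char) : Int × Bool × List (Bool × (Int × Int)) × Option Int × Option Int :=
  let (cs, d, res, sp, le) := st
  let i := p.1
  let ch := p.2
  if ch = ' ' then (cs + 1, d, res, sp, le)
  else if (",()~".toList).contains ch then
    (if !d then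
      match sp with
      | some s => (0, true, res ++ [(true, (s, i - cs))], none, some (i - cs))
      | none => (cs, true, res, none, le)
    else (cs, d, res, sp, le))
  else
    let rl : List (Bool × (Int × Int)) × Option Int :=
      if d then
        match le with
        | some l => ((if l ≠ i then res ++ [(false, (l, i))] else res), none)
        | none => (res, none)
      else (res, le)
    let sp' := match sp with | none => some i | some s => some s
    (0, false, rl.1, sp', rl.2)

def split_hed_string_py (hed_string : String) : List (Bool × (Int × Int)) :=
  let chars := hed_string.toList
  let n : Int := chars.length
  let st := (PySem.List.enumerate chars).foldl pvAStep (0, true, [], none, some 0)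
  let (cs, _d, res, sp, le) := st
  let res :=
    match le with
    | some l => if n ≠ l then res ++ [(false, (l, n))] else res
    | none => res
  match sp with
  | some s => res ++ [(true, (s, n - cs))] ++ (if cs ≠ 0 then [(false, (n - cs, n))] else [])
  | none => res

-- ===== PORT B =====
def pvIsDelim (c : Char) : Bool := (",()~".toList).contains c

-- the inner while loop of phase 1: (j, e, rest-of-chars)
def pvRunEnd : List Char → Int → Int → Int × Int × List Char
  | [], j, e => (j, e, [])
  | c :: cs, j, e =>
    if pvIsDelim c then (j, e, c :: cs)
    else pvRunEnd cs (j + 1) (if c = ' ' then e else j + 1)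

theorem pvRunEnd_len_le : ∀ (l : List Char) (j e : Int), (pvRunEnd l j e).2.2.length ≤ l.length := by
  intro l
  induction l with
  | nil => intro j e; simp [pvRunEnd]
  | cons c cs ih =>
    intro j e
    simp only [pvRunEnd]
    split
    · simp
    · exact le_trans (ih _ _) (by simp)

-- phase 1: the trimmed tag spans
def pvSpans : List Char → Int → List (Int × Int)
  | [], _ => []
  | c :: cs, i =>
    if pvIsDelim c || c = ' ' then pvSpans cs (i + 1)
    else
      let r := pvRunEnd cs (i + 1) (i + 1)
      (i, r.2.1) :: pvSpans r.2.2 r.1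
termination_by l _ => l.length
decreasing_by
  · simp
  · exact lt_of_le_of_lt (pvRunEnd_len_le cs (i + 1) (i + 1)) (by simp)

-- phase 2: interleave delimiter gaps around the spans
def pvInterleave : List (Int × Int) → Int → Int → List (Bool × (Int × Int))
  | [], cursor, n => if cursor < n then [(false, (cursor, n))] else []
  | (s, e) :: rest, cursor, n =>
    (if cursor < s then [(false, (cursor, s))] else []) ++ (true, (s, e)) :: pvInterleave rest e n

def split_hed_string_py_alt (hed_string : String) : List (Bool × (Int × Int)) :=
  let chars := hed_string.toList
  pvInterleave (pvSpans chars 0) 0 (chars.length : Int)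

-- ===== PRECONDITION & SPEC =====
def Spec_split_hed_string_py (hed_string : String) (out : List (Bool × (Int × Int))) : Prop := out = split_hed_string_py_alt hed_string
instance (hed_string : String) (out : List (Bool × (Int × Int))) : Decidable (Spec_split_hed_string_py hed_string out) := by unfold Spec_split_hed_string_py; infer_instance

-- ===== CLAIM (what is proved, stated in full; the proofs are below) =====
def Claim_equal_split_hed_string_py : Prop := ∀ (hed_string : String), Dom_split_hed_string_py hed_string → Spec_split_hed_string_py hed_string (split_hed_string_py hed_string)

-- ===== LEMMAS AND PROOFS =====

-- A's finalisation, as a standalone function of the fold's end state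
def pvFinal (n : Int) (st : Int × Bool × List (Bool × (Int × Int)) × Option Int × Option Int) :
    List (Bool × (Int × Int)) :=
  let (cs, _d, res, sp, le) := st
  let res :=
    match le with
    | some l => if n ≠ l then res ++ [(false, (l, n))] else res
    | none => res
  match sp with
  | some s => res ++ [(true, (s, n - cs))] ++ (if cs ≠ 0 then [(false, (n - cs, n))] else [])
  | none => res

theorem pvContains_eq (c : Char) : ((",()~".toList).contains c) = pvIsDelim c := rfl

theorem pvMain : ∀ (rest : List Char) (i : Int), 0 ≤ i →
    ((∀ (res : List (Bool × (Int × Int))) (l cs : Int), l ≤ i →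
      pvFinal (i + rest.length)
          (List.foldl pvAStep (cs, true, res, none, some l) (PySem.List.enumerate rest i))
        = res ++ pvInterleave (pvSpans rest i) l (i + rest.length)) ∧
     (∀ (res : List (Bool × (Int × Int))) (s e : Int), s < e → e ≤ i →
      pvFinal (i + rest.length)
          (List.foldl pvAStep (i - e, false, res, some s, none) (PySem.List.enumerate rest i))
        = res ++ (true, (s, (pvRunEnd rest i e).2.1)) ::
            pvInterleave (pvSpans (pvRunEnd rest i e).2.2 (pvRunEnd rest i e).1)
              (pvRunEnd rest i e).2.1 (i + rest.length))) := by
  intro rest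
  induction rest with
  | nil =>
    intro i hi
    constructor
    · intro res l cs hl
      simp only [PySem.List.enumerate_nil, List.foldl_nil, List.length_nil, Nat.cast_zero,
        add_zero, pvFinal, pvSpans, pvInterleave]
      split_ifs <;> first | rfl | (exfalso; omega) | simp
    · intro res s e hse hei
      simp only [PySem.List.enumerate_nil, List.foldl_nil, List.length_nil, Nat.cast_zero,
        add_zero, pvFinal, pvRunEnd, pvSpans, pvInterleave]
      have h1 : i - (i - e) = e := by ring
      rw [h1]
      split_ifs <;> first | rfl | (exfalso; omega) | simp
  | cons c cs ih =>
    intro i hi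
    have hn : i + ((c :: cs).length : Int) = (i + 1) + (cs.length : Int) := by
      simp only [List.length_cons]; omega
    constructor
    · intro res l czz hl
      rw [PySem.List.enumerate_cons, List.foldl_cons, hn]
      by_cases hsp : c = ' '
      · -- space: state unchanged apart from junk spacing
        have hstep : pvAStep (czz, true, res, none, some l) (i, c)
            = (czz + 1, true, res, none, some l) := by simp [pvAStep, hsp]
        rw [hstep, (ih (i + 1) (by omega)).1 res l (czz + 1) (by omega)]
        have hs : pvSpans (c :: cs) i = pvSpans cs (i + 1) := by
          rw [pvSpans]; simp [hsp]
        rw [hs]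
      · by_cases hd : pvIsDelim c = true
        · -- delimiter while inside a delimiter: state unchanged
          have hc : ((",()~".toList).contains c) = true := by rw [pvContains_eq]; exact hd
          have hstep : pvAStep (czz, true, res, none, some l) (i, c)
              = (czz, true, res, none, some l) := by
            simp only [pvAStep, hc]; simp [hsp]
          rw [hstep, (ih (i + 1) (by omega)).1 res l czz (by omega)]
          have hs : pvSpans (c :: cs) i = pvSpans cs (i + 1) := by
            rw [pvSpans]; simp [hd]
          rw [hs]
        · -- tag char: close the delimiter gap, open a run at i
          have hc : ((",()~".toList).contains c) = false := by rw [pvContains_eq]; simpa using hd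
          have hstep : pvAStep (czz, true, res, none, some l) (i, c)
              = (0, false, (if l ≠ i then res ++ [(false, (l, i))] else res), some i, none) := by
            simp only [pvAStep, hc]; simp [hsp]
          have hrun := (ih (i + 1) (by omega)).2
            ((if l ≠ i then res ++ [(false, (l, i))] else res)) i (i + 1) (by omega) (by omega)
          have h0 : (i + 1) - (i + 1) = (0 : Int) := by ring
          rw [h0] at hrun
          rw [hstep, hrun]
          have hs : pvSpans (c :: cs) i
              = (i, (pvRunEnd cs (i + 1) (i + 1)).2.1) ::
                pvSpans (pvRunEnd cs (i + 1) (i + 1)).2.2 (pvRunEnd cs (i + 1) (i + 1)).1 := by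
            rw [pvSpans]; simp [hd, hsp]
          rw [hs, pvInterleave]
          rcases eq_or_lt_of_le hl with h | h
          · simp [h]
          · rw [if_pos (by omega : l ≠ i), if_pos h]
            simp
    · intro res s e hse hei
      rw [PySem.List.enumerate_cons, List.foldl_cons, hn]
      by_cases hsp : c = ' '
      · -- space inside a run
        have hstep : pvAStep (i - e, false, res, some s, none) (i, c)
            = (i - e + 1, false, res, some s, none) := by simp [pvAStep, hsp]
        have h1 : i - e + 1 = (i + 1) - e := by ring
        rw [hstep, h1, (ih (i + 1) (by omega)).2 res s e hse (by omega)]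
        have hre : pvRunEnd (c :: cs) i e = pvRunEnd cs (i + 1) e := by
          rw [pvRunEnd]; subst hsp; simp [pvIsDelim]
        rw [hre]
      · by_cases hd : pvIsDelim c = true
        · -- delimiter: emit the tag span, switch to delimiter mode
          have he : i - (i - e) = e := by ring
          have hc : ((",()~".toList).contains c) = true := by rw [pvContains_eq]; exact hd
          have hstep : pvAStep (i - e, false, res, some s, none) (i, c)
              = (0, true, res ++ [(true, (s, e))], none, some e) := by
            simp only [pvAStep, hc]; simp [hsp, he]
          rw [hstep, (ih (i + 1) (by omega)).1 (res ++ [(true, (s, e))]) e 0 (by omega)]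
          have hre : pvRunEnd (c :: cs) i e = (i, e, c :: cs) := by
            rw [pvRunEnd]; simp [hd]
          rw [hre]
          have hs : pvSpans (c :: cs) i = pvSpans cs (i + 1) := by
            rw [pvSpans]; simp [hd]
          simp [hs]
        · -- tag char inside a run: extend the non-space end to i + 1
          have hc : ((",()~".toList).contains c) = false := by rw [pvContains_eq]; simpa using hd
          have hstep : pvAStep (i - e, false, res, some s, none) (i, c)
              = (0, false, res, some s, none) := by
            simp only [pvAStep, hc]; simp [hsp]
          have h0 : (0 : Int) = (i + 1) - (i + 1) := by ring
          rw [hstep, h0, (ih (i + 1) (by omega)).2 res s (i + 1) (by omega) (by omega)]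
          have hre : pvRunEnd (c :: cs) i e = pvRunEnd cs (i + 1) (i + 1) := by
            rw [pvRunEnd]; simp [hd, hsp]
          rw [hre]

theorem split_hed_string_py_spec : Claim_equal_split_hed_string_py := by
  intro h _
  unfold Spec_split_hed_string_py split_hed_string_py split_hed_string_py_alt
  have := (pvMain h.toList 0 le_rfl).1 [] 0 0 le_rfl
  simpa [pvFinal] using this
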